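-- pv_equiv track=rewrite | github.com/Force0123/projekt | Tihi x Keve project/s/1fel.py | megfSzov
-- ===== SOURCE A (Python) =====
-- import string
--
-- def megfSzov(adat):
--                                                 #Leellenőrzi hogy megfelelnek e a betűk adatai.#
--     chars = set(string.ascii_letters)
--     try:
--         strings = [str(a) for a in adat]
--         for b in strings:
--             if not (1 <= len(b) <= 20):
--                 return False
--             if not all(c in chars for c in b):
--                 return False
--         return True
--     except ValueError:
--         return False
-- ===== SOURCE B (Python) =====
-- import re
--
-- _PAT = re.compile(r'[A-Za-z]{1,20}')
--
-- def megfSzov(adat):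
--     try:
--         return all(_PAT.fullmatch(str(a)) is not None for a in adat)
--     except ValueError:
--         return False
-- ===== Notes on version B (the rewrite author's own statement) =====
-- stated objective: idiomatic
-- what changed: Replaces the explicit loop with early returns, length test and per-character set membership by a single short-circuiting all() over a precompiled regular-expression fullmatch [A-Za-z]{1,20}.
import Mathlib
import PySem

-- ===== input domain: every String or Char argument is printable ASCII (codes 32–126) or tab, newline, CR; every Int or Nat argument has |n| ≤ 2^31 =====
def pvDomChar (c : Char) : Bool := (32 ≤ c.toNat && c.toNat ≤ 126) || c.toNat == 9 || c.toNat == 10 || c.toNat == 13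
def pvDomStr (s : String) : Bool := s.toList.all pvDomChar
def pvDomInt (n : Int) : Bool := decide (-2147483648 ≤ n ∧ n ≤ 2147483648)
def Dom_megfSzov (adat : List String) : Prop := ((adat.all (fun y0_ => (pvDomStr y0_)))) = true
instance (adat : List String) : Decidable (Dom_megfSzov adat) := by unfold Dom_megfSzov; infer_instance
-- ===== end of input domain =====

-- B replaces A's explicit loop (length test + per-character set membership with early
-- returns) by one short-circuiting all() over a regex fullmatch [A-Za-z]{1,20}; idiomatic,
-- same cost. On List String inputs str(a) = a never raises, so both are total.

-- ===== PORT A =====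
-- string.ascii_letters
def pvAsciiLetters : List Char :=
  "abcdefghijklmnopqrstuvwxyzABCDEFGHIJKLMNOPQRSTUVWXYZ".toList

-- the for-loop over `strings` with its two early returns
def megfSzovLoop (chars : PySem.Set Char) : List String → Bool
  | [] => true
  | b :: rest =>
    if !(decide (1 ≤ PySem.Str.len b) && decide (PySem.Str.len b ≤ 20)) then false
    else if !(b.toList.all (fun c => PySem.Set.contains chars c)) then false
    else megfSzovLoop chars rest

def megfSzov (adat : List String) : Bool :=
  let chars : PySem.Set Char := PySem.Set.ofList pvAsciiLetters
  let strings := adat.map (fun a => a)   -- [str(a) for a in adat]; str is identity on strings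
  megfSzovLoop chars strings

-- ===== PORT B =====
-- re.fullmatch(r'[A-Za-z]{1,20}', s): semantics of the regex, ported by hand (exact:
-- 1–20 characters, each an ASCII letter)
def pvFullmatch (s : String) : Bool :=
  let cs := s.toList
  decide (1 ≤ cs.length) && decide (cs.length ≤ 20) &&
    cs.all (fun c => ('A' ≤ c && c ≤ 'Z') || ('a' ≤ c && c ≤ 'z'))

def megfSzov_alt (adat : List String) : Bool :=
  adat.all pvFullmatch

-- ===== PRECONDITION & SPEC =====
def Spec_megfSzov (adat : List String) (out : Bool) : Prop := out = megfSzov_alt adat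
instance (adat : List String) (out : Bool) : Decidable (Spec_megfSzov adat out) := by unfold Spec_megfSzov; infer_instance

-- ===== CLAIM (what is proved, stated in full; the proofs are below) =====
def Claim_equal_megfSzov : Prop := ∀ (adat : List String), Dom_megfSzov adat → Spec_megfSzov adat (megfSzov adat)

-- ===== LEMMAS AND PROOFS =====

-- On ASCII characters (all Dom admits), membership in set(string.ascii_letters)
-- is exactly the regex's letter-range test.
set_option maxRecDepth 40000 in
theorem pv_contains_eq_ranges (c : Char) (h : c.toNat < 128) :
    PySem.Set.contains (PySem.Set.ofList pvAsciiLetters) c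
      = (('A' ≤ c && c ≤ 'Z') || ('a' ≤ c && c ≤ 'z')) := by
  have key : ∀ n : Nat, n < 128 →
      PySem.Set.contains (PySem.Set.ofList pvAsciiLetters) (Char.ofNat n)
        = (('A' ≤ Char.ofNat n && Char.ofNat n ≤ 'Z') ||
           ('a' ≤ Char.ofNat n && Char.ofNat n ≤ 'z')) := by decide
  have := key c.toNat h
  rwa [Char.ofNat_toNat] at this

theorem pv_domChar_lt (c : Char) (h : pvDomChar c = true) : c.toNat < 128 := by
  simp [pvDomChar] at h
  omega

theorem pv_all_congr (cs : List Char) (p q : Char → Bool)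
    (h : ∀ c ∈ cs, p c = q c) : cs.all p = cs.all q := by
  induction cs with
  | nil => rfl
  | cons c cs ih =>
    simp only [List.all_cons, h c (List.mem_cons_self ..),
      ih (fun x hx => h x (List.mem_cons_of_mem c hx))]

-- per-string: A's two tests, conjoined, equal B's fullmatch
theorem pv_string_eq (b : String) (hb : pvDomStr b = true) :
    (decide (1 ≤ PySem.Str.len b) && decide (PySem.Str.len b ≤ 20) &&
      b.toList.all (fun c => PySem.Set.contains (PySem.Set.ofList pvAsciiLetters) c))
      = pvFullmatch b := by
  have hall : b.toList.all (fun c => PySem.Set.contains (PySem.Set.ofList pvAsciiLetters) c)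
      = b.toList.all (fun c => ('A' ≤ c && c ≤ 'Z') || ('a' ≤ c && c ≤ 'z')) := by
    apply pv_all_congr
    intro c hc
    apply pv_contains_eq_ranges
    apply pv_domChar_lt
    simp only [pvDomStr, List.all_eq_true] at hb
    exact hb c hc
  have e1 : decide (1 ≤ PySem.Str.len b) = decide (1 ≤ b.toList.length) := by
    rw [PySem.Str.len_eq]
    exact decide_eq_decide.mpr (by omega)
  have e2 : decide (PySem.Str.len b ≤ 20) = decide (b.toList.length ≤ 20) := by
    rw [PySem.Str.len_eq]
    exact decide_eq_decide.mpr (by omega)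
  rw [pvFullmatch, hall, e1, e2]

-- ===== VERDICT (by name: the statement is the Claim_ definition above) =====
theorem megfSzov_spec : Claim_equal_megfSzov := by
  intro adat hdom
  unfold Spec_megfSzov megfSzov megfSzov_alt
  simp only [List.map_id']
  induction adat with
  | nil => rfl
  | cons b rest ih =>
    simp only [Dom_megfSzov, List.all_cons, Bool.and_eq_true] at hdom
    have hrest := ih hdom.2
    have hpf := pv_string_eq b hdom.1
    simp only [megfSzovLoop, List.all_cons, ← hpf]
    cases h1 : (decide (1 ≤ PySem.Str.len b) && decide (PySem.Str.len b ≤ 20)) with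
    | false => simp
    | true =>
      cases h2 : b.toList.all
          (fun c => PySem.Set.contains (PySem.Set.ofList pvAsciiLetters) c) with
      | false => simp
      | true => simp [hrest]
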